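-- pv_equiv track=rewrite | github.com/ppsmk388/GED | tool.py | weighted_scoring_method
-- ===== SOURCE A (Python) =====
-- from collections import defaultdict
--
-- def weighted_scoring_method(rankings):
--     node_scores = defaultdict(int)
--     for ranking in rankings:
--         for rank, nodes in enumerate(ranking):
--             score = len(ranking) - rank
--             for node in nodes:
--                 node_scores[node] += score
--     sorted_nodes = sorted(node_scores.items(), key=lambda x: x[1], reverse=True)
--     combined_ranking = []
--     current_score = None
--     current_group = []
--     for node, score in sorted_nodes:
--         if score != current_score:
--             if current_group:
--                 combined_ranking.append(current_group)
--             current_group = [node]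
--             current_score = score
--         else:
--             current_group.append(node)
--     if current_group:
--         combined_ranking.append(current_group)
--     return combined_ranking
-- ===== SOURCE B (Python) =====
-- def weighted_scoring_method(rankings):
--     node_scores = {}
--     for ranking in rankings:
--         n = len(ranking)
--         for rank, nodes in enumerate(ranking):
--             for node in nodes:
--                 node_scores[node] = node_scores.get(node, 0) + (n - rank)
--     distinct = sorted(set(node_scores.values()), reverse=True)
--     return [[node for node, s in node_scores.items() if s == score]
--             for score in distinct]
-- ===== Notes on version B (the rewrite author's own statement) =====
-- stated objective: alternative
-- what changed: Phase 2 no longer stable-sorts all (node,score) items and run-length-groups them; B sorts only the distinct scores descending and collects each score's group directly from the dict's insertion order (one filter pass per distinct score).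
import Mathlib
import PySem

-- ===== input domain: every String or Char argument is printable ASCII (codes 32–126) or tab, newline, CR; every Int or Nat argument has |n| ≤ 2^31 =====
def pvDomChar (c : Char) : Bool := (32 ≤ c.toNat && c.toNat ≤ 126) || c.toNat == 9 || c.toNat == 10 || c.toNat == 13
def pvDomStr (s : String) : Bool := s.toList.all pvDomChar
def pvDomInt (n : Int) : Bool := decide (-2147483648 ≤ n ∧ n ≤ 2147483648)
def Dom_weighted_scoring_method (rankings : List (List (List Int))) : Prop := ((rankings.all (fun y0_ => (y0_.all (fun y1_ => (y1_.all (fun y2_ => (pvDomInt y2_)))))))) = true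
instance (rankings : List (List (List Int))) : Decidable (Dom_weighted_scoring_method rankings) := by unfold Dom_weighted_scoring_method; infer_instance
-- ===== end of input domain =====

-- B replaces A's sort-all-items-then-run-length-group phase by sorting only the DISTINCT scores
-- descending and collecting each score's group straight from the dict's insertion order (objective: alternative).

-- ===== PORT A =====
-- A's grouping-loop body: state = (combined_ranking, current_score, current_group)
def pvStepA (st : List (List Int) × Option Int × List Int) (p : Int × Int) :
    List (List Int) × Option Int × List Int :=
  if some p.2 ≠ st.2.1 then
    ((if st.2.2.isEmpty then st.1 else st.1 ++ [st.2.2]), some p.2, [p.1])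
  else (st.1, st.2.1, st.2.2 ++ [p.1])

def weighted_scoring_method (rankings : List (List (List Int))) : List (List Int) :=
  let node_scores : PySem.Dict Int Int := rankings.foldl (fun d ranking =>
    (PySem.List.enumerate ranking).foldl (fun d rn =>
      let score : Int := (ranking.length : Int) - rn.1
      rn.2.foldl (fun d node => d.modify node 0 (· + score)) d) d) PySem.Dict.empty
  let sorted_nodes := PySem.List.sorted node_scores.items (fun p => p.2) true
  let st := sorted_nodes.foldl pvStepA ([], none, [])
  if st.2.2.isEmpty then st.1 else st.1 ++ [st.2.2]

-- ===== PORT B =====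
def weighted_scoring_method_alt (rankings : List (List (List Int))) : List (List Int) :=
  let node_scores : PySem.Dict Int Int := rankings.foldl (fun d ranking =>
    let n : Int := (ranking.length : Int)
    (PySem.List.enumerate ranking).foldl (fun d rn =>
      rn.2.foldl (fun d node => d.insert node (d.getD node 0 + (n - rn.1))) d) d) PySem.Dict.empty
  let distinct := PySem.List.sorted (PySem.Set.ofList node_scores.values) (fun s => s) true
  distinct.map (fun score => (node_scores.items.filter (fun p => p.2 == score)).map (fun p => p.1))

-- ===== PRECONDITION & SPEC =====
def Spec_weighted_scoring_method (rankings : List (List (List Int))) (out : List (List Int)) : Prop := out = weighted_scoring_method_alt rankings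
instance (rankings : List (List (List Int))) (out : List (List Int)) : Decidable (Spec_weighted_scoring_method rankings out) := by unfold Spec_weighted_scoring_method; infer_instance

-- ===== CLAIM (what is proved, stated in full; the proofs are below) =====
def Claim_equal_weighted_scoring_method : Prop := ∀ (rankings : List (List (List Int))), Dom_weighted_scoring_method rankings → Spec_weighted_scoring_method rankings (weighted_scoring_method rankings)

-- ===== LEMMAS AND PROOFS =====

lemma flatMap_congr_mem {α β : Type} (l : List α) {f g : α → List β}
    (h : ∀ a ∈ l, f a = g a) : l.flatMap f = l.flatMap g := by
  induction l with
  | nil => rfl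
  | cons a l ih =>
    rw [List.flatMap_cons, List.flatMap_cons, h a (by simp),
      ih (fun b hb => h b (by simp [hb]))]

lemma ins_skip {α : Type} (before : α → α → Bool) (x : α) :
    ∀ (P Q : List α), (∀ y ∈ P, before x y = false) →
      PySem.List.insertBy before x (P ++ Q) = P ++ PySem.List.insertBy before x Q := by
  intro P
  induction P with
  | nil => intro Q _; simp
  | cons a P ih =>
    intro Q h
    have ha : before x a = false := h a (by simp)
    simp only [List.cons_append, PySem.List.insertBy, ha, Bool.false_eq_true, if_false]
    rw [ih Q (fun y hy => h y (by simp [hy]))]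

lemma ins_here {α : Type} (before : α → α → Bool) (x : α) :
    ∀ (Q : List α), (∀ y ∈ Q, before x y = true) →
      PySem.List.insertBy before x Q = x :: Q := by
  intro Q h
  cases Q with
  | nil => simp [PySem.List.insertBy]
  | cons a Q => simp [PySem.List.insertBy, h a (by simp)]

lemma caseA (x : Int × Int) (f f' : Int → List (Int × Int))
    (hfs : f' x.2 = f x.2 ++ [x]) (hfo : ∀ t, t ≠ x.2 → f' t = f t) :
    ∀ K : List Int, K.Pairwise (fun a b => b < a) →
      (∀ t ∈ K, ∀ p ∈ f t, p.2 = t) → x.2 ∈ K →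
      PySem.List.insertBy (fun a b => decide (b.2 < a.2)) x (K.flatMap f) = K.flatMap f' := by
  intro K
  induction K with
  | nil => intro _ _ h; simp at h
  | cons t K ih =>
    intro hp hk hm
    have hhead : ∀ u ∈ K, u < t := fun u hu => (List.pairwise_cons.mp hp).1 u hu
    have hptail := (List.pairwise_cons.mp hp).2
    by_cases ht : t = x.2
    · subst ht
      rw [List.flatMap_cons,
        ins_skip _ x (f x.2) _ (by
          intro y hy
          have hyt : y.2 = x.2 := hk x.2 (by simp) y hy
          simp [hyt]),
        ins_here _ x _ (by
          intro y hy
          obtain ⟨u, hu, hyu⟩ := List.mem_flatMap.mp hy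
          have hy2 : y.2 = u := hk u (by simp [hu]) y hyu
          simp only [hy2, decide_eq_true_eq]
          exact hhead u hu)]
      have htail : K.flatMap f' = K.flatMap f :=
        flatMap_congr_mem K (fun u hu => hfo u (ne_of_lt (hhead u hu)))
      rw [List.flatMap_cons, hfs, htail]
      simp
    · have hm' : x.2 ∈ K := by
        rcases List.mem_cons.mp hm with h | h
        · exact absurd h.symm ht
        · exact h
      have hxt : x.2 < t := hhead _ hm'
      rw [List.flatMap_cons,
        ins_skip _ x (f t) _ (by
          intro y hy
          have hyt : y.2 = t := hk t (by simp) y hy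
          simp only [hyt, decide_eq_false_iff_not]
          omega),
        ih hptail (fun u hu p hpp => hk u (by simp [hu]) p hpp) hm']
      rw [List.flatMap_cons, hfo t ht]

lemma caseB (x : Int × Int) (f f' : Int → List (Int × Int))
    (hfs : f' x.2 = [x]) (hfo : ∀ t, t ≠ x.2 → f' t = f t) :
    ∀ K : List Int, K.Pairwise (fun a b => b < a) →
      (∀ t ∈ K, ∀ p ∈ f t, p.2 = t) → x.2 ∉ K →
      PySem.List.insertBy (fun a b => decide (b.2 < a.2)) x (K.flatMap f)
        = (PySem.List.insertBy (fun a b => decide (b < a)) x.2 K).flatMap f' := by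
  intro K
  induction K with
  | nil => simp [PySem.List.insertBy, hfs]
  | cons t K ih =>
    intro hp hk hm
    have hhead : ∀ u ∈ K, u < t := fun u hu => (List.pairwise_cons.mp hp).1 u hu
    have hptail := (List.pairwise_cons.mp hp).2
    have ht : t ≠ x.2 := fun h => hm (by simp [h.symm])
    by_cases hlt : t < x.2
    · rw [ins_here _ x _ (by
        intro y hy
        obtain ⟨u, hu, hyu⟩ := List.mem_flatMap.mp hy
        have hy2 : y.2 = u := hk u hu y hyu
        rcases List.mem_cons.mp hu with h | h
        · simp only [hy2, h, decide_eq_true_eq]; exact hlt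
        · have := hhead u h
          simp only [hy2, decide_eq_true_eq]
          omega)]
      have hins : PySem.List.insertBy (fun a b => decide (b < a)) x.2 (t :: K) = x.2 :: t :: K := by
        simp [PySem.List.insertBy, hlt]
      have htailK : K.flatMap f' = K.flatMap f :=
        flatMap_congr_mem _ (fun u hu => hfo u (ne_of_lt (lt_trans (hhead u hu) hlt)))
      rw [hins]
      simp only [List.flatMap_cons, hfs, hfo t ht]
      rw [htailK]
      simp
    · have hgt : x.2 < t := by omega
      have hins : PySem.List.insertBy (fun a b => decide (b < a)) x.2 (t :: K) =
          t :: PySem.List.insertBy (fun a b => decide (b < a)) x.2 K := by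
        simp only [PySem.List.insertBy, decide_eq_true_eq]
        rw [if_neg (by omega)]
      rw [List.flatMap_cons,
        ins_skip _ x (f t) _ (by
          intro y hy
          have hyt : y.2 = t := hk t (by simp) y hy
          simp only [hyt, decide_eq_false_iff_not]
          omega),
        ih hptail (fun u hu p hpp => hk u (by simp [hu]) p hpp) (fun h => hm (by simp [h])),
        hins, List.flatMap_cons, hfo t ht]

lemma sorted_rev_snoc {α κ : Type} [LT κ] [DecidableLT κ] (xs : List α) (x : α) (key : α → κ) :
    PySem.List.sorted (xs ++ [x]) key true
      = PySem.List.insertBy (fun a b => decide (key b < key a)) x (PySem.List.sorted xs key true) := by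
  rw [PySem.List.sorted_rev_eq_foldl_insertBy, PySem.List.sorted_rev_eq_foldl_insertBy,
    List.foldl_append]
  rfl

lemma ofList_snoc {α : Type} [BEq α] (xs : List α) (a : α) :
    PySem.Set.ofList (xs ++ [a]) = PySem.Set.add (PySem.Set.ofList xs) a := by
  rw [PySem.Set.ofList_eq_foldl, PySem.Set.ofList_eq_foldl, List.foldl_append]
  rfl

lemma sorted_set_desc (M : List Int) :
    (PySem.List.sorted (PySem.Set.ofList M) (fun s => s) true).Pairwise (fun a b => b < a) := by
  have h1 := PySem.List.sorted_pairwise_rev (PySem.Set.ofList M) (fun s => s)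
  have h2 : (PySem.List.sorted (PySem.Set.ofList M) (fun s => s) true).Nodup :=
    (PySem.List.sorted_perm _ _ true).symm.nodup (PySem.Set.nodup_ofList _)
  exact (h1.and h2).imp (fun h => lt_of_le_of_ne h.1 (Ne.symm h.2))

lemma sort_eq_buckets : ∀ l : List (Int × Int),
    PySem.List.sorted l (fun p => p.2) true
      = (PySem.List.sorted (PySem.Set.ofList (l.map (fun p => p.2))) (fun s => s) true).flatMap
          (fun s => l.filter (fun p => p.2 == s)) := by
  intro l
  induction l using List.reverseRecOn with
  | nil => rfl
  | append_singleton l x ih =>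
    have hdesc := sorted_set_desc (l.map (fun p => p.2))
    have hkey : ∀ t ∈ PySem.List.sorted (PySem.Set.ofList (l.map (fun p => p.2))) (fun s => s) true,
        ∀ p ∈ l.filter (fun p => p.2 == t), p.2 = t := by
      intro t _ p hp
      simpa using (List.mem_filter.mp hp).2
    have hfo : ∀ t, t ≠ x.2 →
        (l ++ [x]).filter (fun p => p.2 == t) = l.filter (fun p => p.2 == t) := by
      intro t hts
      have hx : (x.2 == t) = false := beq_eq_false_iff_ne.mpr (Ne.symm hts)
      simp [List.filter_append, hx]
    rw [sorted_rev_snoc, ih]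
    have hmap : (l ++ [x]).map (fun p => p.2) = l.map (fun p => p.2) ++ [x.2] := by simp
    rw [hmap, ofList_snoc]
    by_cases hmem : x.2 ∈ PySem.Set.ofList (l.map (fun p => p.2))
    · have hadd : PySem.Set.add (PySem.Set.ofList (l.map (fun p => p.2))) x.2
          = PySem.Set.ofList (l.map (fun p => p.2)) := by
        simp [PySem.Set.add, PySem.Set.contains, hmem]
      rw [hadd]
      exact caseA x _ _
        (by simp [List.filter_append])
        hfo
        _ hdesc hkey ((PySem.List.mem_sorted _ _ _ _).mpr hmem)
    · have hadd : PySem.Set.add (PySem.Set.ofList (l.map (fun p => p.2))) x.2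
          = PySem.Set.ofList (l.map (fun p => p.2)) ++ [x.2] := by
        simp [PySem.Set.add, PySem.Set.contains, hmem]
      rw [hadd, sorted_rev_snoc]
      exact caseB x _ _
        (by
          have hnil : l.filter (fun p => p.2 == x.2) = [] := by
            apply List.filter_eq_nil_iff.mpr
            intro p hp hpx
            apply hmem
            rw [PySem.Set.mem_ofList]
            exact List.mem_map.mpr ⟨p, hp, by simpa using hpx⟩
          simp [List.filter_append, hnil])
        hfo
        _ hdesc hkey (fun h => hmem ((PySem.List.mem_sorted _ _ _ _).mp h))

def pvFinish (st : List (List Int) × Option Int × List Int) : List (List Int) :=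
  if st.2.2.isEmpty then st.1 else st.1 ++ [st.2.2]

lemma group_run (s : Int) : ∀ (xs : List (Int × Int)), (∀ p ∈ xs, p.2 = s) →
    ∀ cb cg, xs.foldl pvStepA (cb, some s, cg) = (cb, some s, cg ++ xs.map (fun p => p.1)) := by
  intro xs
  induction xs with
  | nil => intro _ cb cg; simp
  | cons p xs ih =>
    intro h cb cg
    have hp : p.2 = s := h p (by simp)
    have hstep : pvStepA (cb, some s, cg) p = (cb, some s, cg ++ [p.1]) := by
      simp [pvStepA, hp]
    rw [List.foldl_cons, hstep, ih (fun q hq => h q (by simp [hq])) cb (cg ++ [p.1])]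
    simp

lemma group_flat (f : Int → List (Int × Int)) :
    ∀ K : List Int, K.Pairwise (fun a b => a ≠ b) →
      (∀ t ∈ K, f t ≠ [] ∧ ∀ p ∈ f t, p.2 = t) →
      ∀ cb cg (cs : Option Int), (∀ t ∈ K, cs ≠ some t) →
      pvFinish ((K.flatMap f).foldl pvStepA (cb, cs, cg))
        = (if cg.isEmpty then cb else cb ++ [cg]) ++ K.map (fun t => (f t).map (fun p => p.1)) := by
  intro K
  induction K with
  | nil => intro _ _ cb cg cs _; simp [pvFinish]
  | cons t K ih =>
    intro hp hb cb cg cs hcs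
    obtain ⟨hne, hk⟩ := hb t (by simp)
    obtain ⟨q, qs, hft⟩ := List.exists_cons_of_ne_nil hne
    have hq2 : q.2 = t := hk q (by rw [hft]; simp)
    have hcond : ¬ (some t = cs) := Ne.symm (hcs t (by simp))
    have hstep : pvStepA (cb, cs, cg) q
        = ((if cg.isEmpty then cb else cb ++ [cg]), some t, [q.1]) := by
      simp [pvStepA, hq2, hcond]
    rw [List.flatMap_cons, hft]
    simp only [List.cons_append, List.foldl_cons]
    rw [hstep, List.foldl_append,
      group_run t qs (fun p hp' => hk p (by rw [hft]; simp [hp'])) _ _,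
      ih (List.pairwise_cons.mp hp).2
        (fun u hu => hb u (by simp [hu]))
        _ _ _
        (fun u hu h => ((List.pairwise_cons.mp hp).1 u hu) (Option.some.inj h))]
    simp [hft]

lemma core (d : PySem.Dict Int Int) :
    pvFinish ((PySem.List.sorted d.items (fun p => p.2) true).foldl pvStepA ([], none, []))
      = (PySem.List.sorted (PySem.Set.ofList d.values) (fun s => s) true).map
          (fun score => (d.items.filter (fun p => p.2 == score)).map (fun p => p.1)) := by
  have hvals : d.values = d.items.map (fun p => p.2) := rfl
  rw [hvals, sort_eq_buckets]
  have hdesc := sorted_set_desc (d.items.map (fun p => p.2))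
  rw [group_flat _ _ (hdesc.imp (fun h => ne_of_gt h))
    (by
      intro t htK
      constructor
      · have htM : t ∈ d.items.map (fun p => p.2) :=
          (PySem.Set.mem_ofList _ _).mp ((PySem.List.mem_sorted _ _ _ _).mp htK)
        obtain ⟨p, hp, hpt⟩ := List.mem_map.mp htM
        exact List.ne_nil_of_mem (List.mem_filter.mpr ⟨hp, by simp [hpt]⟩)
      · intro p hp
        simpa using (List.mem_filter.mp hp).2)
    [] [] none (by simp)]
  simp

-- ===== VERDICT (by name: the statement is the Claim_ definition above) =====
theorem weighted_scoring_method_spec : Claim_equal_weighted_scoring_method := by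
  intro rankings _
  show weighted_scoring_method rankings = weighted_scoring_method_alt rankings
  exact core (rankings.foldl (fun d ranking =>
    (PySem.List.enumerate ranking).foldl (fun d rn =>
      let score : Int := (ranking.length : Int) - rn.1
      rn.2.foldl (fun d node => d.modify node 0 (· + score)) d) d) PySem.Dict.empty)
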